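-- pv_equiv track=rewrite | github.com/GGlinsek/programiranje-1 | Specops.py | situacija
-- ===== SOURCE A (Python) =====
-- def situacija(specialci, marsovci, sirina, visina):
--     specialc = "ABCDEFGHIJ"
--     marsovc = "abcdefghij"
--     zemljevid = []
--     for i in range(visina):
--         vrsta = []
--         for j in range(sirina):
--             vsi_v_kvadratu = set()
--             stevilo_cloveka = 0
--             for clovek in specialci:
--                 if (j, i) == clovek:
--                     vsi_v_kvadratu.add(specialc[stevilo_cloveka])
--                 stevilo_cloveka += 1
--             stevilo_bitja = 0
--             for bitje in marsovci:
--                 if (j, i) == bitje: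
--                     vsi_v_kvadratu.add(marsovc[stevilo_bitja])
--                 stevilo_bitja += 1
--             vrsta.append(vsi_v_kvadratu)
--         zemljevid.append(vrsta)
--     return zemljevid
-- ===== SOURCE B (Python) =====
-- def situacija(specialci, marsovci, sirina, visina):
--     zemljevid = [[set() for _ in range(sirina)] for _ in range(visina)]
--     for (x, y), c in list(zip(specialci, "ABCDEFGHIJ")) + list(zip(marsovci, "abcdefghij")):
--         if 0 <= x < sirina and 0 <= y < visina:
--             zemljevid[y][x].add(c)
--     return zemljevid
-- ===== Notes on version B (the rewrite author's own statement) =====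
-- stated objective: faster
-- what changed: Instead of scanning both entity lists for every grid cell (three nested loops), B allocates an empty-set grid once and makes a single pass over the entities (zipped with their letters), placing each letter directly into its cell, dropping the per-cell scans.
import Mathlib
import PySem

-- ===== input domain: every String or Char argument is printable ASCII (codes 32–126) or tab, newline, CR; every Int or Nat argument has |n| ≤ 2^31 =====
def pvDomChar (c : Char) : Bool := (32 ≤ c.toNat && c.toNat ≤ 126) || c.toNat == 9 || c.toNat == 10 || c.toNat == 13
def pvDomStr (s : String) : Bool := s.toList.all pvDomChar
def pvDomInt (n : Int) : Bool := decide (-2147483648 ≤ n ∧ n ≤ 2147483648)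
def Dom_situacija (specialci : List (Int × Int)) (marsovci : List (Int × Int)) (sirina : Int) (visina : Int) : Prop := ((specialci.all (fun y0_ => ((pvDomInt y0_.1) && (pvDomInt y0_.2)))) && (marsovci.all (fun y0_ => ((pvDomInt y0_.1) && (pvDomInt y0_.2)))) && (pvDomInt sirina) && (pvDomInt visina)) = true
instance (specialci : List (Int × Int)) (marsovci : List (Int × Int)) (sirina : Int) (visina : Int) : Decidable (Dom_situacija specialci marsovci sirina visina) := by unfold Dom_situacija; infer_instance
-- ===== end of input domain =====

-- B builds the grid of empty sets once and places each (entity, letter) pair directly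
-- into its cell in one pass, instead of A's per-cell scan over both entity lists.

-- ===== PORT A =====
-- one step of A's inner 'for clovek in specialci' / 'for bitje in marsovci' loop:
-- the accumulator carries (the set so far, the running counter); S[counter] is indexed
-- exactly as by Python (PySem.Str.pyGet?; none = IndexError, excluded by Pre_ below)
def stepA (t : Int × Int) (S : String) (acc : PySem.Set String × Int) (p : Int × Int) :
    PySem.Set String × Int :=
  ((if t = p then
      match PySem.Str.pyGet? S acc.2 with
      | some c => PySem.Set.add acc.1 (String.ofList [c])
      | none => acc.1
    else acc.1), acc.2 + 1)

def situacija (specialci : List (Int × Int)) (marsovci : List (Int × Int)) (sirina : Int) (visina : Int) : List (List (List String)) :=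
  (PySem.List.pyRange 0 visina 1).map (fun i =>
    (PySem.List.pyRange 0 sirina 1).map (fun j =>
      (marsovci.foldl (stepA (j, i) "abcdefghij")
        ((specialci.foldl (stepA (j, i) "ABCDEFGHIJ") (PySem.Set.empty, 0)).1, 0)).1))

-- ===== PORT B =====
-- the zipped entity list: each of the first ten specialci/marsovci paired with its letter
def entsOf (specialci : List (Int × Int)) (marsovci : List (Int × Int)) :
    List ((Int × Int) × String) :=
  specialci.zip ["A","B","C","D","E","F","G","H","I","J"] ++
    marsovci.zip ["a","b","c","d","e","f","g","h","i","j"]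

-- one step of B's single pass: place the letter into its cell if it lies on the grid
def updB (sirina visina : Int) (g : List (List (PySem.Set String)))
    (e : (Int × Int) × String) : List (List (PySem.Set String)) :=
  if 0 ≤ e.1.1 ∧ e.1.1 < sirina ∧ 0 ≤ e.1.2 ∧ e.1.2 < visina then
    g.modify e.1.2.toNat (fun row => row.modify e.1.1.toNat (fun s => PySem.Set.add s e.2))
  else g

def situacija_alt (specialci : List (Int × Int)) (marsovci : List (Int × Int)) (sirina : Int) (visina : Int) : List (List (List String)) :=
  (entsOf specialci marsovci).foldl (updB sirina visina)
    (List.replicate visina.toNat (List.replicate sirina.toNat PySem.Set.empty))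

-- ===== PRECONDITION & SPEC =====
-- Pre_ excludes exactly the inputs on which A RAISES IndexError: an entity with index ≥ 10
-- lying inside the grid makes A index its 10-letter name string out of range
-- (B, whose zip with the letter string ignores entities past the tenth, returns a grid there).
def Pre_situacija (specialci : List (Int × Int)) (marsovci : List (Int × Int)) (sirina : Int) (visina : Int) : Prop :=
  (∀ p ∈ specialci.drop 10, ¬ (0 ≤ p.1 ∧ p.1 < sirina ∧ 0 ≤ p.2 ∧ p.2 < visina)) ∧
  (∀ p ∈ marsovci.drop 10, ¬ (0 ≤ p.1 ∧ p.1 < sirina ∧ 0 ≤ p.2 ∧ p.2 < visina))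
instance (specialci : List (Int × Int)) (marsovci : List (Int × Int)) (sirina : Int) (visina : Int) : Decidable (Pre_situacija specialci marsovci sirina visina) := by unfold Pre_situacija; infer_instance

def pvWitness_situacija : (List (Int × Int)) × (List (Int × Int)) × Int × Int :=
  ([(0, 0), (2, 1)], [(1, 0), (0, 0)], 3, 2)

def Spec_situacija (specialci : List (Int × Int)) (marsovci : List (Int × Int)) (sirina : Int) (visina : Int) (out : List (List (List String))) : Prop := out = situacija_alt specialci marsovci sirina visina
instance (specialci : List (Int × Int)) (marsovci : List (Int × Int)) (sirina : Int) (visina : Int) (out : List (List (List String))) : Decidable (Spec_situacija specialci marsovci sirina visina out) := by unfold Spec_situacija; infer_instance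

-- ===== CLAIM (what is proved, stated in full; the proofs are below) =====
def Claim_equal_situacija : Prop := ∀ (specialci : List (Int × Int)) (marsovci : List (Int × Int)) (sirina : Int) (visina : Int), Dom_situacija specialci marsovci sirina visina → Pre_situacija specialci marsovci sirina visina → Spec_situacija specialci marsovci sirina visina (situacija specialci marsovci sirina visina)

-- ===== LEMMAS AND PROOFS =====

-- the per-cell fold both sides compute: the letters of the zipped entities at cell (j, i)
def cellOf (ents : List ((Int × Int) × String)) (j i : Int) : PySem.Set String :=
  ents.foldl (fun s e => if (j, i) = e.1 then PySem.Set.add s e.2 else s) PySem.Set.empty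

-- ---- A side ----

lemma foldA_no_match (t : Int × Int) (S : String) :
    ∀ (l : List (Int × Int)) (k : Int) (s : PySem.Set String),
      (∀ p ∈ l, p ≠ t) → (l.foldl (stepA t S) (s, k)).1 = s := by
  intro l
  induction l with
  | nil => intro k s _; rfl
  | cons p l ih =>
    intro k s h
    have hp : t = p → False := fun e => h p (by simp) e.symm
    simp only [List.foldl_cons, stepA, if_neg hp]
    exact ih (k + 1) s (fun q hq => h q (by simp [hq]))

lemma foldA_eq_zip (t : Int × Int) (S : String) :
    ∀ (l : List (Int × Int)) (cs : List String) (n : Nat) (s : PySem.Set String),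
      (∀ k : Nat, k < cs.length →
        (PySem.Str.pyGet? S ((n + k : Nat) : Int)).map (fun c => String.ofList [c])
          = some (cs.getD k "")) →
      (∀ p ∈ l.drop cs.length, p ≠ t) →
      (l.foldl (stepA t S) (s, (n : Int))).1
        = (l.zip cs).foldl (fun s e => if t = e.1 then PySem.Set.add s e.2 else s) s := by
  intro l
  induction l with
  | nil => intro cs n s _ _; simp
  | cons p l ih =>
    intro cs n s hcs hl
    cases cs with
    | nil =>
      simp only [List.zip_nil_right, List.foldl_nil]
      exact foldA_no_match t S (p :: l) n s (by simpa using hl)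
    | cons c cs' =>
      have hc : (PySem.Str.pyGet? S (n : Int)).map (fun c => String.ofList [c]) = some c := by
        have := hcs 0 (by simp)
        simpa using this
      have hstep : stepA t S (s, (n : Int)) p
          = ((if t = p then PySem.Set.add s c else s), (n : Int) + 1) := by
        cases hg : PySem.Str.pyGet? S (n : Int) with
        | none => rw [hg] at hc; simp at hc
        | some ch =>
          rw [hg] at hc
          simp only [Option.map_some, Option.some.injEq] at hc
          have hg' : S.toList[n]? = some ch := by simpa using hg
          simp [stepA, hg', hc]
      have hcast : ((n : Int) + 1) = ((n + 1 : Nat) : Int) := by push_cast; ring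
      have hcs' : ∀ k : Nat, k < cs'.length →
          (PySem.Str.pyGet? S ((n + 1 + k : Nat) : Int)).map (fun c => String.ofList [c])
            = some (cs'.getD k "") := by
        intro k hk
        have := hcs (k + 1) (by simp; omega)
        have harith : n + (k + 1) = n + 1 + k := by omega
        rw [harith] at this
        simpa using this
      have hl' : ∀ p ∈ l.drop cs'.length, p ≠ t := by
        intro q hq
        exact hl q (by simpa using hq)
      simp only [List.foldl_cons, hstep, hcast, List.zip_cons_cons]
      rw [ih cs' (n + 1) _ hcs' hl']

lemma hS_upper : ∀ k : Nat, k < (["A","B","C","D","E","F","G","H","I","J"] : List String).length →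
    (PySem.Str.pyGet? "ABCDEFGHIJ" ((0 + k : Nat) : Int)).map (fun c => String.ofList [c])
      = some ((["A","B","C","D","E","F","G","H","I","J"] : List String).getD k "") := by
  intro k hk
  simp only [List.length_cons, List.length_nil] at hk
  interval_cases k <;> decide

lemma hS_lower : ∀ k : Nat, k < (["a","b","c","d","e","f","g","h","i","j"] : List String).length →
    (PySem.Str.pyGet? "abcdefghij" ((0 + k : Nat) : Int)).map (fun c => String.ofList [c])
      = some ((["a","b","c","d","e","f","g","h","i","j"] : List String).getD k "") := by
  intro k hk
  simp only [List.length_cons, List.length_nil] at hk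
  interval_cases k <;> decide

-- the cell A computes at in-grid coordinates (j, i) is cellOf of the zipped entities
lemma cellA_eq (specialci marsovci : List (Int × Int)) (sirina visina : Int)
    (hpre : Pre_situacija specialci marsovci sirina visina)
    (j i : Int) (hj0 : 0 ≤ j) (hj : j < sirina) (hi0 : 0 ≤ i) (hi : i < visina) :
    (marsovci.foldl (stepA (j, i) "abcdefghij")
        ((specialci.foldl (stepA (j, i) "ABCDEFGHIJ") (PySem.Set.empty, 0)).1, 0)).1
      = cellOf (entsOf specialci marsovci) j i := by
  have hs : ∀ p ∈ specialci.drop 10, p ≠ (j, i) := by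
    intro p hp he
    exact hpre.1 p (by simpa using hp) (by rw [he]; exact ⟨hj0, hj, hi0, hi⟩)
  have hm : ∀ p ∈ marsovci.drop 10, p ≠ (j, i) := by
    intro p hp he
    exact hpre.2 p (by simpa using hp) (by rw [he]; exact ⟨hj0, hj, hi0, hi⟩)
  have h1 := foldA_eq_zip (j, i) "ABCDEFGHIJ" specialci
    ["A","B","C","D","E","F","G","H","I","J"] 0 PySem.Set.empty hS_upper (by simpa using hs)
  have h2 := foldA_eq_zip (j, i) "abcdefghij" marsovci
    ["a","b","c","d","e","f","g","h","i","j"] 0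
    ((specialci.foldl (stepA (j, i) "ABCDEFGHIJ") (PySem.Set.empty, 0)).1)
    hS_lower (by simpa using hm)
  have h0 : ((0 : Nat) : Int) = (0 : Int) := rfl
  rw [h0] at h1 h2
  rw [h2, h1, cellOf, entsOf, List.foldl_append]

-- ---- B side ----

lemma foldB_len (W H : Int) :
    ∀ (ents : List ((Int × Int) × String)) (g : List (List (PySem.Set String))),
      (ents.foldl (updB W H) g).length = g.length := by
  intro ents
  induction ents with
  | nil => intro g; rfl
  | cons e ents ih =>
    intro g
    rw [List.foldl_cons, ih]
    unfold updB
    split <;> simp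

lemma foldB_rowlen (W H : Int) :
    ∀ (ents : List ((Int × Int) × String)) (g : List (List (PySem.Set String))) (y : Nat),
      ((ents.foldl (updB W H) g)[y]?).map List.length = (g[y]?).map List.length := by
  intro ents
  induction ents with
  | nil => intro g y; rfl
  | cons e ents ih =>
    intro g y
    rw [List.foldl_cons, ih]
    unfold updB
    split
    · rw [List.getElem?_modify]
      cases g[y]? with
      | none => rfl
      | some r => simp only [Option.map_some]; split <;> simp
    · rfl

lemma updB_cell (W H : Int) (e : (Int × Int) × String)
    (g : List (List (PySem.Set String))) (y x : Nat)
    (hy : (y : Int) < H) (hx : (x : Int) < W) :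
    ((updB W H g e)[y]?.bind (fun r => r[x]?))
      = (g[y]?.bind (fun r => r[x]?)).map
          (fun s => if ((x : Int), (y : Int)) = e.1 then PySem.Set.add s e.2 else s) := by
  unfold updB
  split
  · rename_i hb
    obtain ⟨hx0, hxW, hy0, hyH⟩ := hb
    rw [List.getElem?_modify]
    cases hg : g[y]? with
    | none => simp
    | some r =>
      by_cases hey : e.1.2.toNat = y
      · by_cases hex : e.1.1.toNat = x
        · have he : ((x : Int), (y : Int)) = e.1 := by
            rw [Prod.ext_iff]
            constructor <;> simp <;> omega
          cases hr : r[x]? <;> simp [hey, hex, he, hr]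
        · have he : ¬ (((x : Int), (y : Int)) = e.1) := by
            intro h
            apply hex
            have : e.1.1 = (x : Int) := by rw [← h]
            omega
          cases hr : r[x]? <;> simp [hey, hex, he, hr]
      · have he : ¬ (((x : Int), (y : Int)) = e.1) := by
          intro h
          apply hey
          have : e.1.2 = (y : Int) := by rw [← h]
          omega
        cases hr : r[x]? <;> simp [hey, he, hr]
  · rename_i hb
    have he : ¬ (((x : Int), (y : Int)) = e.1) := by
      intro h
      apply hb
      rw [← h]
      exact ⟨by positivity, hx, by positivity, hy⟩
    cases hg : g[y]? with
    | none => simp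
    | some r => cases hr : r[x]? <;> simp [he, hr]

lemma foldB_cell (W H : Int) (y x : Nat) (hy : (y : Int) < H) (hx : (x : Int) < W) :
    ∀ (ents : List ((Int × Int) × String)) (g : List (List (PySem.Set String))),
      ((ents.foldl (updB W H) g)[y]?.bind (fun r => r[x]?))
        = (g[y]?.bind (fun r => r[x]?)).map
            (fun s => ents.foldl
              (fun s e => if ((x : Int), (y : Int)) = e.1 then PySem.Set.add s e.2 else s) s) := by
  intro ents
  induction ents with
  | nil =>
    intro g
    cases hg : g[y]? with
    | none => simp [hg]
    | some r => cases hr : r[x]? <;> simp [hg, hr]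
  | cons e ents ih =>
    intro g
    rw [List.foldl_cons, ih, updB_cell W H e g y x hy hx]
    cases hg : g[y]?.bind (fun r => r[x]?) <;> simp

-- ---- assembly ----

-- both sides as the same map of maps over the two ranges
def target (specialci marsovci : List (Int × Int)) (sirina visina : Int) :
    List (List (List String)) :=
  (PySem.List.pyRange 0 visina 1).map (fun i =>
    (PySem.List.pyRange 0 sirina 1).map (fun j => cellOf (entsOf specialci marsovci) j i))

lemma A_eq_target (specialci marsovci : List (Int × Int)) (sirina visina : Int)
    (hpre : Pre_situacija specialci marsovci sirina visina) :
    situacija specialci marsovci sirina visina = target specialci marsovci sirina visina := by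
  unfold situacija target
  apply List.map_congr_left
  intro i hi
  apply List.map_congr_left
  intro j hj
  rw [PySem.List.mem_pyRange_one] at hi hj
  exact cellA_eq specialci marsovci sirina visina hpre j i hj.1 hj.2 hi.1 hi.2

lemma B_eq_target (specialci marsovci : List (Int × Int)) (sirina visina : Int) :
    situacija_alt specialci marsovci sirina visina
      = target specialci marsovci sirina visina := by
  unfold situacija_alt target
  set ents := entsOf specialci marsovci with hents
  set g0 : List (List (PySem.Set String)) :=
    List.replicate visina.toNat (List.replicate sirina.toNat PySem.Set.empty) with hg0
  apply List.ext_getElem?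
  intro y
  by_cases hy : y < visina.toNat
  · -- both rows are `some`; compare the rows pointwise
    have hyH : (y : Int) < visina := by omega
    have hlen : (ents.foldl (updB sirina visina) g0).length = visina.toNat := by
      rw [foldB_len]; simp [hg0]
    have hRy : ((PySem.List.pyRange 0 visina 1).map (fun i =>
        (PySem.List.pyRange 0 sirina 1).map (fun j => cellOf ents j i)))[y]?
          = some ((PySem.List.pyRange 0 sirina 1).map (fun j => cellOf ents j (y : Int))) := by
      rw [List.getElem?_map, PySem.List.getElem?_pyRange_one,
        if_pos (by omega : y < (visina - 0).toNat)]
      simp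
    obtain ⟨r, hr⟩ : ∃ r, (ents.foldl (updB sirina visina) g0)[y]? = some r := by
      exact ⟨_, List.getElem?_eq_getElem (by omega)⟩
    rw [hr, hRy]
    congr 1
    -- row lengths
    have hrl : r.length = sirina.toNat := by
      have := foldB_rowlen sirina visina ents g0 y
      rw [hr] at this
      simp [hg0, hy] at this
      omega
    apply List.ext_getElem?
    intro x
    by_cases hx : x < sirina.toNat
    · have hxW : (x : Int) < sirina := by omega
      have hcell := foldB_cell sirina visina y x hyH hxW ents g0
      rw [hr] at hcell
      have hg0c : g0[y]?.bind (fun r => r[x]?) = some PySem.Set.empty := by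
        simp [hg0, hy, hx]
      rw [hg0c] at hcell
      simp only [Option.bind_some, Option.map_some] at hcell
      rw [hcell, List.getElem?_map, PySem.List.getElem?_pyRange_one,
        if_pos (by omega : x < (sirina - 0).toNat)]
      simp only [Option.map_some, Option.some.injEq, zero_add]
      rfl
    · have h1 : r[x]? = none := by
        rw [List.getElem?_eq_none_iff]; omega
      have h2 : ((PySem.List.pyRange 0 sirina 1).map (fun j => cellOf ents j (y : Int)))[x]?
          = none := by
        rw [List.getElem?_eq_none_iff]
        simp only [List.length_map, PySem.List.length_pyRange_one]
        omega
      rw [h1, h2]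
  · have h1 : (ents.foldl (updB sirina visina) g0)[y]? = none := by
      rw [List.getElem?_eq_none_iff, foldB_len]
      simp [hg0]; omega
    have h2 : ((PySem.List.pyRange 0 visina 1).map (fun i =>
        (PySem.List.pyRange 0 sirina 1).map (fun j => cellOf ents j i)))[y]? = none := by
      rw [List.getElem?_eq_none_iff]
      simp only [List.length_map, PySem.List.length_pyRange_one]
      omega
    rw [h1, h2]

-- ===== VERDICT (by name: the statement is the Claim_ definition above) =====
theorem situacija_spec : Claim_equal_situacija := by
  intro specialci marsovci sirina visina _ hpre
  unfold Spec_situacija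
  rw [A_eq_target specialci marsovci sirina visina hpre,
    B_eq_target specialci marsovci sirina visina]
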